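-- pv_equiv track=rewrite | github.com/aravindparappil46/leetcode-practice | leetcode-practice.py | invokeGravity
-- ===== SOURCE A (Python) =====
-- def invokeGravity(b):
--     R = len(b)
--     C = len(b[0])
--     for r in range(R):
--         for c in range(C):
--             if b[r][c] == 0 and r != 0:
--                 b[r][c] = b[r-1][c]
--                 b[r-1][c] = 0
--     return b
-- ===== SOURCE B (Python) =====
-- def invokeGravity(b):
--     # Different decomposition: compute each output column directly from segments
--     # (each nonzero drops by the length of the zero-run immediately below it),
--     # instead of A's cascaded in-place swaps. Mutates b in place like A.
--     R = len(b)
--     C = len(b[0])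
--     for c in range(C):
--         col = [b[r][c] for r in range(R)]
--         out = []
--         i = 0
--         while i < R and col[i] == 0:
--             out.append(col[i])
--             i += 1
--         while i < R:
--             v = col[i]
--             i += 1
--             z = 0
--             while i < R and col[i] == 0:
--                 z += 1
--                 i += 1
--             out.extend([0] * z)
--             out.append(v)
--         for r in range(R):
--             b[r][c] = out[r]
--     return b
-- ===== Notes on version B (the rewrite author's own statement) =====
-- stated objective: alternative
-- what changed: B computes each output column directly in one top-to-bottom segment scan (each nonzero drops by the length of the zero-run immediately below it) and writes it back, instead of A's row-by-row cascade of in-place swap steps across the whole grid.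
import Mathlib
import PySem

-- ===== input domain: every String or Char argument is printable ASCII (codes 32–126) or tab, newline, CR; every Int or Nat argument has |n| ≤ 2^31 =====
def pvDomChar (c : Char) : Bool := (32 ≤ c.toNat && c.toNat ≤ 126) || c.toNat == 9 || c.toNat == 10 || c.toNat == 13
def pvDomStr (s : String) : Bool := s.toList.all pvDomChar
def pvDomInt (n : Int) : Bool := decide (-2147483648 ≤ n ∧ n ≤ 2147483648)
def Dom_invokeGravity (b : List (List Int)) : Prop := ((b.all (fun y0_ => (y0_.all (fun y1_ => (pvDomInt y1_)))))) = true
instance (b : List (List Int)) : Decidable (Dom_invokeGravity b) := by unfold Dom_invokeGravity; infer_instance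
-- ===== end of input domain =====

-- B replaces A's grid-wide cascade of in-place swaps by a direct per-column segment
-- computation (objective: alternative decomposition, same cost). Both Pythons mutate b
-- in place and return it; the equivalence proved here is about the RETURN value.

-- ===== PORT A =====
-- b[r][c] read (in range under Pre_; 0 is a don't-care default outside it)
def pvGetCell (g : List (List Int)) (r c : Nat) : Int := (g.getD r []).getD c 0
-- b[r][c] = x (in range under Pre_; no-op outside it)
def pvSetCell (g : List (List Int)) (r c : Nat) (x : Int) : List (List Int) :=
  g.modify r (fun row => row.set c x)

-- the body of A's double loop for one (r, c)
def pvStepA (g : List (List Int)) (r c : Nat) : List (List Int) :=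
  if pvGetCell g r c = 0 ∧ r ≠ 0 then
    pvSetCell (pvSetCell g r c (pvGetCell g (r - 1) c)) (r - 1) c 0
  else g

def invokeGravity (b : List (List Int)) : List (List Int) :=
  (List.range b.length).foldl
    (fun g r => (List.range (b.getD 0 []).length).foldl (fun g c => pvStepA g r c) g) b

-- ===== PORT B =====
-- length of the leading run of zeros (Source B's inner `while … == 0` scans)
def pvCountZ : List Int → Nat
  | [] => 0
  | x :: xs => if x = 0 then pvCountZ xs + 1 else 0

-- Source B's second while loop: value v followed by its zero-run of length z → zeros first, v last
def pvDropSeg : List Int → List Int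
  | [] => []
  | v :: rest =>
    List.replicate (pvCountZ rest) 0 ++ v :: pvDropSeg (rest.drop (pvCountZ rest))
termination_by w => w.length
decreasing_by simp

-- Source B's column transform: leading zeros stay, then the segments
def pvNewCol (col : List Int) : List Int :=
  col.take (pvCountZ col) ++ pvDropSeg (col.drop (pvCountZ col))

def invokeGravity_alt (b : List (List Int)) : List (List Int) :=
  (List.range (b.getD 0 []).length).foldl
    (fun g c =>
      let col := (List.range b.length).map (fun r => pvGetCell g r c)
      let out := pvNewCol col
      (List.range b.length).foldl (fun g r => pvSetCell g r c (out.getD r 0)) g)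
    b

-- ===== PRECONDITION & SPEC =====
-- Pre_ excludes exactly the inputs where A raises IndexError: the empty grid
-- (len(b[0])) and grids with a row shorter than row 0 (b[r][c] out of range).
def Pre_invokeGravity (b : List (List Int)) : Prop :=
  b ≠ [] ∧ ∀ row ∈ b, (b.getD 0 []).length ≤ row.length
instance (b : List (List Int)) : Decidable (Pre_invokeGravity b) := by
  unfold Pre_invokeGravity; infer_instance
def pvWitness_invokeGravity : List (List Int) := [[1, 0], [0, 2]]

def Spec_invokeGravity (b : List (List Int)) (out : List (List Int)) : Prop :=
  out = invokeGravity_alt b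
instance (b : List (List Int)) (out : List (List Int)) : Decidable (Spec_invokeGravity b out) := by
  unfold Spec_invokeGravity; infer_instance

-- ===== CLAIM (what is proved, stated in full; the proofs are below) =====
def Claim_equal_invokeGravity : Prop :=
  ∀ (b : List (List Int)), Dom_invokeGravity b → Pre_invokeGravity b →
    Spec_invokeGravity b (invokeGravity b)

-- ===== LEMMAS AND PROOFS =====

-- column c of a grid, totalized with default 0
def pvGetCol (g : List (List Int)) (c : Nat) : List Int := g.map (fun row => row.getD c 0)

-- A's step, restricted to a single column
def pvStepCol (w : List Int) (r : Nat) : List Int :=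
  if w.getD r 0 = 0 ∧ r ≠ 0 then (w.set r (w.getD (r - 1) 0)).set (r - 1) 0 else w

theorem pvCountZ_le (w : List Int) : pvCountZ w ≤ w.length := by
  induction w with
  | nil => simp [pvCountZ]
  | cons x xs ih => simp only [pvCountZ]; split
                    · simpa using ih
                    · simp

theorem pvDropSeg_length (w : List Int) : (pvDropSeg w).length = w.length := by
  induction w using pvDropSeg.induct with
  | case1 => simp [pvDropSeg]
  | case2 v rest ih =>
    have h := pvCountZ_le rest
    simp [pvDropSeg, ih]
    omega

theorem pvNewCol_length (w : List Int) : (pvNewCol w).length = w.length := by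
  have h := pvCountZ_le w
  simp [pvNewCol, pvDropSeg_length]
  omega

theorem pvCountZ_append_ne (u : List Int) (v : Int) (hv : v ≠ 0) :
    pvCountZ (u ++ [v]) = pvCountZ u := by
  induction u with
  | nil => simp [pvCountZ, hv]
  | cons x xs ih => simp [pvCountZ, ih]

theorem pvCountZ_append_zero_full (u : List Int) (h : pvCountZ u = u.length) :
    pvCountZ (u ++ [0]) = u.length + 1 := by
  induction u with
  | nil => simp [pvCountZ]
  | cons x xs ih =>
    simp only [pvCountZ, List.length_cons] at h ⊢
    by_cases hx : x = 0
    · simp only [hx, if_true] at h ⊢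
      rw [List.cons_append]
      simp [pvCountZ, ih (by omega)]
    · simp [hx] at h

theorem pvCountZ_append_zero_lt (u : List Int) (h : pvCountZ u < u.length) :
    pvCountZ (u ++ [0]) = pvCountZ u := by
  induction u with
  | nil => simp at h
  | cons x xs ih =>
    simp only [pvCountZ, List.length_cons] at h ⊢
    by_cases hx : x = 0
    · simp only [hx, if_true] at h ⊢
      rw [List.cons_append]
      simp [pvCountZ, ih (by omega)]
    · simp only [hx, if_false]
      simp [pvCountZ, hx]

theorem pvCountZ_full_all_zero (u : List Int) (h : pvCountZ u = u.length) :
    ∀ x ∈ u, x = 0 := by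
  induction u with
  | nil => simp
  | cons x xs ih =>
    simp only [pvCountZ, List.length_cons] at h
    by_cases hx : x = 0
    · simp only [hx, if_true] at h
      intro y hy
      rcases List.mem_cons.mp hy with h1 | h1
      · rw [h1, hx]
      · exact ih (by omega) y h1
    · simp [hx] at h

theorem pvDropSeg_append_ne (v : Int) (hv : v ≠ 0) (d : List Int) :
    pvDropSeg (d ++ [v]) = pvDropSeg d ++ [v] := by
  induction d using pvDropSeg.induct with
  | case1 => simp [pvDropSeg, pvCountZ]
  | case2 v0 rest ih =>
    have hz := pvCountZ_le rest
    rw [List.cons_append, pvDropSeg, pvDropSeg,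
        pvCountZ_append_ne rest v hv, List.drop_append_of_le_length hz, ih]
    simp

theorem pvDropSeg_ne_nil (d : List Int) (hd : d ≠ []) : pvDropSeg d ≠ [] := by
  intro h
  have := pvDropSeg_length d
  rw [h] at this
  simp at this
  exact hd (List.eq_nil_of_length_eq_zero this.symm)

theorem pvGetLastD_append (l1 l2 : List Int) (d : Int) (h : l2 ≠ []) :
    (l1 ++ l2).getLastD d = l2.getLastD d := by
  rw [List.getLastD_eq_getLast?, List.getLastD_eq_getLast?, List.getLast?_append,
      List.getLast?_eq_some_getLast h]
  simp

theorem pvGetLastD_cons (x : Int) (l : List Int) (d : Int) (h : l ≠ []) :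
    (x :: l).getLastD d = l.getLastD d := pvGetLastD_append [x] l d h

theorem pvDropSeg_append_zero (d : List Int) (hd : d ≠ []) :
    pvDropSeg (d ++ [0]) = (pvDropSeg d).dropLast ++ [0, (pvDropSeg d).getLastD 0] := by
  induction d using pvDropSeg.induct with
  | case1 => simp at hd
  | case2 v0 rest ih =>
    have hz := pvCountZ_le rest
    by_cases hfull : pvCountZ rest = rest.length
    · rw [List.cons_append, pvDropSeg, pvDropSeg,
          pvCountZ_append_zero_full rest hfull, hfull]
      rw [List.drop_of_length_le (by simp), List.drop_of_length_le (le_refl _)]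
      simp only [pvDropSeg]
      rw [List.dropLast_concat, List.getLastD_concat, List.replicate_succ']
      simp
    · have hlt : pvCountZ rest < rest.length := lt_of_le_of_ne hz hfull
      rw [List.cons_append, pvDropSeg, pvDropSeg,
          pvCountZ_append_zero_lt rest hlt,
          List.drop_append_of_le_length hz]
      have hne : rest.drop (pvCountZ rest) ≠ [] := by
        intro h
        have h2 := List.length_drop (l := rest) (i := pvCountZ rest)
        rw [h] at h2
        simp at h2
        omega
      rw [ih hne]
      have hD : pvDropSeg (rest.drop (pvCountZ rest)) ≠ [] := pvDropSeg_ne_nil _ hne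
      rw [List.dropLast_append_of_ne_nil (by simp : v0 :: pvDropSeg (rest.drop (pvCountZ rest)) ≠ []),
          List.dropLast_cons_of_ne_nil hD,
          pvGetLastD_append _ _ _ (by simp),
          pvGetLastD_cons _ _ _ hD]
      simp

theorem pvNewCol_full (u : List Int) (h : pvCountZ u = u.length) : pvNewCol u = u := by
  rw [pvNewCol, h, List.take_of_length_le (le_refl _), List.drop_of_length_le (le_refl _)]
  simp [pvDropSeg]

theorem pvNewCol_append_ne (u : List Int) (v : Int) (hv : v ≠ 0) :
    pvNewCol (u ++ [v]) = pvNewCol u ++ [v] := by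
  have hz := pvCountZ_le u
  rw [pvNewCol, pvNewCol, pvCountZ_append_ne u v hv,
      List.take_append_of_le_length hz, List.drop_append_of_le_length hz,
      pvDropSeg_append_ne v hv]
  simp

theorem pvNewCol_append_zero (u : List Int) (hu : u ≠ []) :
    pvNewCol (u ++ [0]) = (pvNewCol u).dropLast ++ [0, (pvNewCol u).getLastD 0] := by
  have hz := pvCountZ_le u
  by_cases hfull : pvCountZ u = u.length
  · rw [pvNewCol_full u hfull, pvNewCol, pvCountZ_append_zero_full u hfull]
    rw [List.take_of_length_le (by simp), List.drop_of_length_le (by simp)]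
    have hlast : u.getLastD 0 = 0 :=
      pvCountZ_full_all_zero u hfull _ (by
        rw [List.getLastD_eq_getLast?, List.getLast?_eq_some_getLast hu]
        exact List.getLast_mem hu)
    have hu2 : u = u.dropLast ++ [u.getLastD 0] := by
      conv_lhs => rw [← List.dropLast_append_getLast hu]
      rw [List.getLastD_eq_getLast?, List.getLast?_eq_some_getLast hu]
      simp
    conv_lhs => rw [hu2]
    rw [hlast]
    simp [pvDropSeg]
  · have hlt : pvCountZ u < u.length := lt_of_le_of_ne hz hfull
    have hne : u.drop (pvCountZ u) ≠ [] := by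
      intro h
      have h2 := List.length_drop (l := u) (i := pvCountZ u)
      rw [h] at h2
      simp at h2
      omega
    have hD : pvDropSeg (u.drop (pvCountZ u)) ≠ [] := pvDropSeg_ne_nil _ hne
    rw [pvNewCol, pvNewCol, pvCountZ_append_zero_lt u hlt,
        List.take_append_of_le_length hz, List.drop_append_of_le_length hz,
        pvDropSeg_append_zero _ hne,
        List.dropLast_append_of_ne_nil hD,
        pvGetLastD_append _ _ _ hD]
    simp

theorem pvNewCol_singleton (x : Int) : pvNewCol [x] = [x] := by
  by_cases hx : x = 0
  · subst hx; exact pvNewCol_full [0] (by simp [pvCountZ])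
  · simp [pvNewCol, pvCountZ, hx, pvDropSeg]

theorem pvGetD_last (t : List Int) (ht : t ≠ []) :
    t.getD (t.length - 1) 0 = t.getLastD 0 := by
  rw [List.getD_eq_getElem?_getD, List.getLastD_eq_getLast?,
      List.getLast?_eq_some_getLast ht, List.getLast_eq_getElem,
      List.getElem?_eq_getElem (by have := List.length_pos_of_ne_nil ht; omega)]

theorem pvSet_last (t : List Int) (x : Int) (ht : t ≠ []) :
    t.set (t.length - 1) x = t.dropLast ++ [x] := by
  induction t with
  | nil => simp at ht
  | cons a as ih =>
    cases as with
    | nil => simp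
    | cons b bs =>
      have h := ih (by simp)
      simp only [List.length_cons, Nat.add_sub_cancel] at h ⊢
      have hdl : (a :: b :: bs).dropLast = a :: (b :: bs).dropLast :=
        List.dropLast_cons_of_ne_nil (by simp)
      rw [List.set_cons_succ, h, hdl]
      simp

theorem pvCore_prefix (w : List Int) (k : Nat) (hk : k ≤ w.length) :
    (List.range k).foldl pvStepCol w = pvNewCol (w.take k) ++ w.drop k := by
  induction k with
  | zero => simp [pvNewCol, pvCountZ, pvDropSeg]
  | succ k ih =>
    have hklt : k < w.length := by omega
    rw [List.range_succ, List.foldl_append, ih (by omega)]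
    set u := w.take k with hu
    have hulen : u.length = k := by simp [hu]; omega
    set t := pvNewCol u with htdef
    have ht : t.length = k := by rw [htdef, pvNewCol_length]; exact hulen
    have hd : w.drop k = w[k] :: w.drop (k + 1) := List.drop_eq_getElem_cons hklt
    have htake : w.take (k + 1) = u ++ [w[k]] := by
      rw [List.take_add_one, List.getElem?_eq_getElem hklt]; rfl
    have hgetk : (t ++ w.drop k).getD k 0 = w[k] := by
      rw [List.getD_eq_getElem?_getD, List.getElem?_append_right (by omega), hd]
      simp [ht, List.getElem?_eq_getElem hklt]
    simp only [List.foldl_cons, List.foldl_nil, pvStepCol, hgetk]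
    by_cases hc : w[k] = 0 ∧ k ≠ 0
    · have hk0 : k ≠ 0 := hc.2
      have htne : t ≠ [] := by
        intro h; rw [h] at ht; simp at ht; omega
      have hune : u ≠ [] := by
        intro h; rw [h] at hulen; simp at hulen; omega
      simp only [hc.1, hc.2, ne_eq, not_false_eq_true, and_self, if_true]
      have hget1 : (t ++ w.drop k).getD (k - 1) 0 = t.getLastD 0 := by
        rw [List.getD_eq_getElem?_getD, List.getElem?_append_left (by omega),
            ← List.getD_eq_getElem?_getD, show k - 1 = t.length - 1 by omega]
        exact pvGetD_last t htne
      rw [hget1]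
      have hset1 : (t ++ w.drop k).set k (t.getLastD 0) =
          t ++ t.getLastD 0 :: w.drop (k + 1) := by
        rw [hd, List.set_append, if_neg (by omega), show k - t.length = 0 by omega]
        rfl
      rw [hset1, List.set_append, if_pos (by omega),
          show k - 1 = t.length - 1 by omega, pvSet_last t 0 htne]
      rw [htake, hc.1, pvNewCol_append_zero u hune, ← htdef]
      simp
    · simp only [if_neg (by tauto)]
      rcases Nat.eq_zero_or_pos k with hk0 | hkpos
      · subst hk0
        have hu0 : u = [] := by simp [hu]
        have ht0 : t = [] := by rw [htdef, hu0]; simp [pvNewCol, pvDropSeg]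
        rw [htake, hu0, ht0]
        simp only [List.nil_append, pvNewCol_singleton]
        simpa using hd
      · have hvne : w[k] ≠ 0 := by
          intro h; exact hc ⟨h, by omega⟩
        rw [htake, pvNewCol_append_ne u _ hvne, ← htdef, hd]
        simp

-- the heart: A's cascade over one column equals B's segment transform
theorem pvCore (w : List Int) :
    (List.range w.length).foldl pvStepCol w = pvNewCol w := by
  have h := pvCore_prefix w w.length (le_refl _)
  rw [List.take_of_length_le (le_refl _), List.drop_of_length_le (le_refl _)] at h
  simpa using h

-- ---- grid plumbing ----

theorem pvSetCell_shape (g : List (List Int)) (r c : Nat) (x : Int) :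
    (pvSetCell g r c x).map List.length = g.map List.length := by
  apply List.ext_getElem?
  intro i
  rw [List.getElem?_map, List.getElem?_map]
  unfold pvSetCell
  rw [List.getElem?_modify]
  cases h : g[i]? with
  | none => simp
  | some row => simp only [Option.map_some]; split <;> simp

theorem pvGetCell_col (g : List (List Int)) (r c : Nat) :
    pvGetCell g r c = (pvGetCol g c).getD r 0 := by
  unfold pvGetCell pvGetCol
  simp only [List.getD_eq_getElem?_getD, List.getElem?_map]
  cases h : g[r]? <;> simp

theorem pvGetCol_length (g : List (List Int)) (c : Nat) :
    (pvGetCol g c).length = g.length := by simp [pvGetCol]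

theorem pvSetCell_col_ne (g : List (List Int)) (r c c' : Nat) (x : Int) (h : c' ≠ c) :
    pvGetCol (pvSetCell g r c x) c' = pvGetCol g c' := by
  apply List.ext_getElem?
  intro i
  unfold pvGetCol pvSetCell
  rw [List.getElem?_map, List.getElem?_map, List.getElem?_modify]
  cases h2 : g[i]? with
  | none => simp
  | some row =>
    simp only [Option.map_eq_map, Option.map_some]
    split
    · rw [List.getD_eq_getElem?_getD, List.getD_eq_getElem?_getD,
          List.getElem?_set_ne (fun hh => h hh.symm)]
    · rfl

theorem pvShape_row_len {b g : List (List Int)} (hs : g.map List.length = b.map List.length)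
    {i : Nat} {row brow : List Int} (hg : g[i]? = some row) (hb : b[i]? = some brow) :
    row.length = brow.length := by
  have := congrArg (fun l => l[i]?) hs
  simp only [List.getElem?_map, hg, hb, Option.map_some] at this
  exact Option.some.inj this

theorem pvSetCell_col_self (b g : List (List Int)) (r c : Nat) (x : Int)
    (hs : g.map List.length = b.map List.length)
    (hrow : ∀ row ∈ b, (b.getD 0 []).length ≤ row.length)
    (hc : c < (b.getD 0 []).length) :
    pvGetCol (pvSetCell g r c x) c = (pvGetCol g c).set r x := by
  apply List.ext_getElem?
  intro i
  unfold pvGetCol pvSetCell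
  rw [List.getElem?_map, List.getElem?_modify, List.getElem?_set]
  have hlen : g.length = b.length := by
    have := congrArg List.length hs; simpa using this
  by_cases hri : r = i
  · subst hri
    by_cases hr : r < g.length
    · have hgr : g[r]? = some g[r] := List.getElem?_eq_getElem hr
      have hbr : b[r]? = some b[r] := List.getElem?_eq_getElem (by omega)
      have hrl : (g[r]).length = (b[r]).length := pvShape_row_len hs hgr hbr
      have hcb : c < (g[r]).length := by
        have := hrow b[r] (List.getElem_mem (by omega : r < b.length))
        omega
      rw [hgr]
      simp only [Option.map_eq_map, Option.map_some, if_true,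
        if_pos (show r < (List.map (fun row => row.getD c 0) g).length by
          simpa [List.length_map] using hr)]
      rw [List.getD_eq_getElem?_getD, List.getElem?_set_self hcb]
      rfl
    · have hgr : g[r]? = none := List.getElem?_eq_none (by omega)
      rw [hgr]
      simp only [Option.map_eq_map, Option.map_none, if_true,
        if_neg (show ¬ r < (List.map (fun row => row.getD c 0) g).length by
          simp only [List.length_map]; omega)]
  · cases h2 : g[i]? with
    | none =>
      simp [hri]
      exact List.getElem?_eq_none_iff.mp h2
    | some row =>
      simp [hri]
      exact ⟨row, h2, rfl⟩

theorem pvGrid_ext (g g' : List (List Int))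
    (h1 : g.map List.length = g'.map List.length)
    (h2 : ∀ c, pvGetCol g c = pvGetCol g' c) : g = g' := by
  have hlen : g.length = g'.length := by
    have := congrArg List.length h1; simpa using this
  apply List.ext_getElem hlen
  intro i hi hi'
  have hrl : (g[i]).length = (g'[i]).length :=
    pvShape_row_len h1 (List.getElem?_eq_getElem hi) (List.getElem?_eq_getElem hi')
  apply List.ext_getElem hrl
  intro c hc hc'
  have := congrArg (fun l => l.getD i 0) (h2 c)
  simp only [pvGetCol, List.getD_eq_getElem?_getD, List.getElem?_map,
    List.getElem?_eq_getElem hi, List.getElem?_eq_getElem hi',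
    Option.map_some, Option.getD_some] at this
  rw [List.getElem?_eq_getElem hc, List.getElem?_eq_getElem hc'] at this
  simpa using this

-- ---- A-side loop factoring ----

theorem pvStepA_shape (g : List (List Int)) (r c : Nat) :
    (pvStepA g r c).map List.length = g.map List.length := by
  unfold pvStepA
  split
  · rw [pvSetCell_shape, pvSetCell_shape]
  · rfl

theorem pvStepA_col_ne (g : List (List Int)) (r c c' : Nat) (h : c' ≠ c) :
    pvGetCol (pvStepA g r c) c' = pvGetCol g c' := by
  unfold pvStepA
  split
  · rw [pvSetCell_col_ne _ _ _ _ _ h, pvSetCell_col_ne _ _ _ _ _ h]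
  · rfl

theorem pvStepA_col_self (b g : List (List Int)) (r c : Nat)
    (hs : g.map List.length = b.map List.length)
    (hrow : ∀ row ∈ b, (b.getD 0 []).length ≤ row.length)
    (hc : c < (b.getD 0 []).length) :
    pvGetCol (pvStepA g r c) c = pvStepCol (pvGetCol g c) r := by
  unfold pvStepA pvStepCol
  rw [pvGetCell_col g r c, pvGetCell_col g (r - 1) c]
  split
  · rw [pvSetCell_col_self b _ _ _ _ (by rw [pvSetCell_shape]; exact hs) hrow hc,
        pvSetCell_col_self b _ _ _ _ hs hrow hc]
  · rfl

theorem pvInner_shape (b g : List (List Int)) (r : Nat) (n : Nat)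
    (hs : g.map List.length = b.map List.length) :
    ((List.range n).foldl (fun g c => pvStepA g r c) g).map List.length
      = b.map List.length := by
  induction n with
  | zero => simpa using hs
  | succ n ih =>
    rw [List.range_succ, List.foldl_append]
    simp only [List.foldl_cons, List.foldl_nil]
    rw [pvStepA_shape]
    exact ih

theorem pvInner_col (b g : List (List Int)) (r : Nat) (n : Nat) (c' : Nat)
    (hs : g.map List.length = b.map List.length)
    (hrow : ∀ row ∈ b, (b.getD 0 []).length ≤ row.length)
    (hn : n ≤ (b.getD 0 []).length) :
    pvGetCol ((List.range n).foldl (fun g c => pvStepA g r c) g) c'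
      = if c' < n then pvStepCol (pvGetCol g c') r else pvGetCol g c' := by
  induction n with
  | zero => simp
  | succ n ih =>
    rw [List.range_succ, List.foldl_append]
    simp only [List.foldl_cons, List.foldl_nil]
    by_cases hcn : c' = n
    · subst hcn
      rw [pvStepA_col_self b _ r c' (pvInner_shape b g r c' hs) hrow (by omega),
          ih (by omega), if_neg (by omega), if_pos (by omega)]
    · rw [pvStepA_col_ne _ _ _ _ hcn, ih (by omega)]
      by_cases h2 : c' < n
      · rw [if_pos h2, if_pos (by omega)]
      · rw [if_neg h2, if_neg (by omega)]

theorem pvOuter_shape (b : List (List Int)) (m : Nat) :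
    (((List.range m).foldl
        (fun g r => (List.range (b.getD 0 []).length).foldl (fun g c => pvStepA g r c) g)
        b)).map List.length = b.map List.length := by
  induction m with
  | zero => simp
  | succ m ih =>
    rw [List.range_succ, List.foldl_append]
    simp only [List.foldl_cons, List.foldl_nil]
    exact pvInner_shape b _ m _ ih

theorem pvOuter_col (b : List (List Int)) (m : Nat) (c' : Nat)
    (hrow : ∀ row ∈ b, (b.getD 0 []).length ≤ row.length) :
    pvGetCol ((List.range m).foldl
        (fun g r => (List.range (b.getD 0 []).length).foldl (fun g c => pvStepA g r c) g)
        b) c'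
      = if c' < (b.getD 0 []).length
        then (List.range m).foldl pvStepCol (pvGetCol b c')
        else pvGetCol b c' := by
  induction m with
  | zero => simp
  | succ m ih =>
    rw [List.range_succ, List.foldl_append]
    simp only [List.foldl_cons, List.foldl_nil]
    rw [pvInner_col b _ m _ c' (pvOuter_shape b m) hrow (le_refl _), ih]
    by_cases hc : c' < (b.getD 0 []).length
    · rw [if_pos hc, if_pos hc, if_pos hc, List.foldl_append]
      simp
    · rw [if_neg hc, if_neg hc, if_neg hc]

-- ---- B-side loop factoring ----

theorem pvColRead (b g : List (List Int)) (c : Nat) (hlen : g.length = b.length) :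
    (List.range b.length).map (fun r => pvGetCell g r c) = pvGetCol g c := by
  unfold pvGetCol
  apply List.ext_getElem?
  intro i
  rw [List.getElem?_map, List.getElem?_map]
  by_cases hi : i < b.length
  · rw [List.getElem?_range hi, List.getElem?_eq_getElem (show i < g.length by omega)]
    simp [pvGetCell, List.getD_eq_getElem?_getD,
      List.getElem?_eq_getElem (show i < g.length by omega)]
  · rw [List.getElem?_eq_none (by simpa using hi),
        List.getElem?_eq_none (show g.length ≤ i by omega)]
    rfl

theorem pvSetFold_shape (b g : List (List Int)) (c : Nat) (out : List Int) (n : Nat)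
    (hs : g.map List.length = b.map List.length) :
    ((List.range n).foldl (fun g r => pvSetCell g r c (out.getD r 0)) g).map List.length
      = b.map List.length := by
  induction n with
  | zero => simpa using hs
  | succ n ih =>
    rw [List.range_succ, List.foldl_append]
    simp only [List.foldl_cons, List.foldl_nil]
    rw [pvSetCell_shape]
    exact ih

theorem pvSetFold_col_self (b g : List (List Int)) (c : Nat) (out : List Int)
    (hs : g.map List.length = b.map List.length)
    (hrow : ∀ row ∈ b, (b.getD 0 []).length ≤ row.length)
    (hc : c < (b.getD 0 []).length)
    (hout : out.length = b.length)
    (n : Nat) (hn : n ≤ b.length) :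
    pvGetCol ((List.range n).foldl (fun g r => pvSetCell g r c (out.getD r 0)) g) c
      = out.take n ++ (pvGetCol g c).drop n := by
  have hglen : g.length = b.length := by
    have := congrArg List.length hs; simpa using this
  have hdlen : (pvGetCol g c).length = b.length := by rw [pvGetCol_length]; omega
  induction n with
  | zero => simp
  | succ n ih =>
    rw [List.range_succ, List.foldl_append]
    simp only [List.foldl_cons, List.foldl_nil]
    rw [pvSetCell_col_self b _ _ _ _ (pvSetFold_shape b g c out n hs) hrow hc,
        ih (by omega)]
    have htl : (out.take n).length = n := by simp; omega
    rw [List.set_append, if_neg (by omega), show n - (out.take n).length = 0 by omega,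
        List.drop_eq_getElem_cons (show n < (pvGetCol g c).length by omega)]
    simp only [List.set_cons_zero]
    rw [List.getD_eq_getElem?_getD, List.getElem?_eq_getElem (show n < out.length by omega),
        List.take_add_one, List.getElem?_eq_getElem (show n < out.length by omega)]
    simp only [Option.toList_some, Option.getD_some, List.append_assoc, List.singleton_append]

theorem pvSetFold_col_ne (g : List (List Int)) (c c' : Nat) (out : List Int) (n : Nat)
    (h : c' ≠ c) :
    pvGetCol ((List.range n).foldl (fun g r => pvSetCell g r c (out.getD r 0)) g) c'
      = pvGetCol g c' := by
  induction n with
  | zero => simp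
  | succ n ih =>
    rw [List.range_succ, List.foldl_append]
    simp only [List.foldl_cons, List.foldl_nil]
    rw [pvSetCell_col_ne _ _ _ _ _ h]
    exact ih

theorem pvAlt_shape (b : List (List Int)) (n : Nat) :
    ((List.range n).foldl
        (fun g c =>
          (List.range b.length).foldl
            (fun g2 r => pvSetCell g2 r c ((pvNewCol ((List.range b.length).map (fun r => pvGetCell g r c))).getD r 0)) g)
        b).map List.length = b.map List.length := by
  induction n with
  | zero => simp
  | succ n ih =>
    rw [List.range_succ, List.foldl_append]
    simp only [List.foldl_cons, List.foldl_nil]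
    exact pvSetFold_shape b _ _ _ _ ih

theorem pvAlt_col (b : List (List Int))
    (hrow : ∀ row ∈ b, (b.getD 0 []).length ≤ row.length) :
    ∀ (n : Nat), n ≤ (b.getD 0 []).length → ∀ (c' : Nat),
    pvGetCol ((List.range n).foldl
        (fun g c =>
          (List.range b.length).foldl
            (fun g2 r => pvSetCell g2 r c ((pvNewCol ((List.range b.length).map (fun r => pvGetCell g r c))).getD r 0)) g)
        b) c'
      = if c' < n then pvNewCol (pvGetCol b c') else pvGetCol b c' := by
  intro n
  induction n with
  | zero => intro _ c'; simp
  | succ n ih =>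
    intro hn c'
    rw [List.range_succ, List.foldl_append]
    simp only [List.foldl_cons, List.foldl_nil]
    have hs' := pvAlt_shape b n
    set G := (List.range n).foldl
        (fun g c =>
          (List.range b.length).foldl
            (fun g2 r => pvSetCell g2 r c ((pvNewCol ((List.range b.length).map (fun r => pvGetCell g r c))).getD r 0)) g)
        b with hG
    have hlen : G.length = b.length := by
      have := congrArg List.length hs'; simpa using this
    have hread : (List.range b.length).map (fun r => pvGetCell G r n) = pvGetCol b n := by
      rw [pvColRead b G n hlen, ih (by omega) n, if_neg (by omega)]
    rw [hread]
    have hout : (pvNewCol (pvGetCol b n)).length = b.length := by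
      rw [pvNewCol_length, pvGetCol_length]
    by_cases hcn : c' = n
    · subst hcn
      rw [pvSetFold_col_self b G c' (pvNewCol (pvGetCol b c')) hs' hrow (by omega) hout
            b.length (le_refl _)]
      rw [List.take_of_length_le (by omega),
          List.drop_of_length_le (by rw [pvGetCol_length]; omega)]
      rw [if_pos (by omega)]
      simp
    · rw [pvSetFold_col_ne G n c' _ b.length hcn, ih (by omega) c']
      by_cases h2 : c' < n
      · rw [if_pos h2, if_pos (by omega)]
      · rw [if_neg h2, if_neg (by omega)]

-- ===== VERDICT (by name: the statement is the Claim_ definition above) =====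
theorem invokeGravity_spec : Claim_equal_invokeGravity := by
  unfold Claim_equal_invokeGravity Spec_invokeGravity
  intro b hdom hpre
  obtain ⟨hne, hrow⟩ := hpre
  apply pvGrid_ext
  · simp only [invokeGravity, invokeGravity_alt]
    rw [pvOuter_shape b b.length, pvAlt_shape b ((b.getD 0 []).length)]
  · intro c
    simp only [invokeGravity, invokeGravity_alt]
    rw [pvOuter_col b b.length c hrow, pvAlt_col b hrow ((b.getD 0 []).length) (le_refl _) c]
    by_cases hc : c < (b.getD 0 []).length
    · rw [if_pos hc, if_pos hc,
          show List.range b.length = List.range (pvGetCol b c).length by rw [pvGetCol_length],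
          pvCore]
    · rw [if_neg hc, if_neg hc]
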